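-- pv_equiv track=rewrite | github.com/dnwls16071/Everyday-Algorithm | 프로그래머스/2/84512. 모음 사전/모음 사전.py | solution
-- ===== SOURCE A (Python) =====
-- def DFS(data, string, cnt):
--     if cnt == 6:
--         return
--     if string != "":
--         data.append(string)
--     for c in ["A", "E", "I", "O", "U"]:
--         DFS(data, "".join(map(str, [string, c])), cnt+1)
--
-- def solution(word):
--     answer = 0
--     data = []
--     DFS(data, "", 0)
--     for i in range(len(data)):
--         if data[i] == word:
--             return answer + 1
--         answer += 1
-- ===== SOURCE B (Python) =====
-- def solution(word):
--     # Direct positional formula: each prefix of the word contributes 1 (for the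
--     # prefix itself) plus index-of-letter * size of each earlier sibling subtree.
--     total = 0
--     block = 781  # number of dictionary words in a whole subtree of depth 5
--     for c in word:
--         total += "AEIOU".index(c) * block + 1
--         block = (block - 1) // 5
--     return total
-- ===== Notes on version B (the rewrite author's own statement) =====
-- stated objective: simpler
-- what changed: B replaces A's generation of the full 3905-word dictionary followed by a linear scan with a direct positional formula over the word's letters (vowel index times subtree size 781/156/31/6/1, plus one per letter).
-- outside the precondition, e.g. on solution('XY'): A returns None, B raises ValueError; on solution('AAAAAA'): A returns None, B returns 6; on solution(''): A returns None, B returns 0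
import Mathlib
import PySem

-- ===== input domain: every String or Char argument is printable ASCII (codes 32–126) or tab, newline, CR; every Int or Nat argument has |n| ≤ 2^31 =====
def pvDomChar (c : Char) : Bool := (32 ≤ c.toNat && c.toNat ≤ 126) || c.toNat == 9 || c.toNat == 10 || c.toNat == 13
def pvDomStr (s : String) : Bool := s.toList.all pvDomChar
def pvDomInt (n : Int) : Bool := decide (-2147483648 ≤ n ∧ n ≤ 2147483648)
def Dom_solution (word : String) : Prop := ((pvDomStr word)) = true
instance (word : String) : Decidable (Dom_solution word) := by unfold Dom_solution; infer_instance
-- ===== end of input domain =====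

-- B replaces A's generation of the full 3905-word dictionary followed by a linear
-- scan with a direct positional formula over the word's letters (simpler, no dictionary built).

-- ===== PORT A =====
-- Python's DFS appends to a shared list; the port returns the appended segment.
-- Python counts cnt upward to 6; the port uses fuel = 6 - cnt (same recursion tree).
def pyVowelStrs : List String := ["A", "E", "I", "O", "U"]

def DFS (string : String) (fuel : Nat) : List String :=
  match fuel with
  | 0 => []          -- cnt == 6: return
  | f + 1 =>
    (if string != "" then [string] else []) ++
    pyVowelStrs.flatMap (fun c => DFS (PySem.Str.join "" [string, c]) f)

-- the 'for i in range(len(data)): if data[i] == word: return answer + 1; answer += 1' scan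
def findLoop (data : List String) (word : String) (answer : Int) : Option Int :=
  match data with
  | [] => none      -- loop falls through: Python returns None (excluded by Pre_)
  | d :: ds => if d == word then some (answer + 1) else findLoop ds word (answer + 1)

def solution (word : String) : Int :=
  (findLoop (DFS "" 6) word 0).getD 0

-- ===== PORT B =====
def vowelChars : List Char := ['A', 'E', 'I', 'O', 'U']

-- "AEIOU".index(c): ValueError (c not a vowel) is excluded by Pre_
def vowelIdx (c : Char) : Int := (((PySem.List.index? vowelChars c).getD 0 : Nat) : Int)

def solution_alt (word : String) : Int :=
  (word.toList.foldl
    (fun (st : Int × Int) c =>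
      (st.1 + vowelIdx c * st.2 + 1, PySem.Int.floordiv (st.2 - 1) 5))
    (0, 781)).1

-- ===== PRECONDITION & SPEC =====
-- Pre_ excludes exactly the inputs on which A's scan loop falls through and Python
-- returns None (not an int): the empty word, words longer than 5, and words
-- containing a character other than A/E/I/O/U.
def Pre_solution (word : String) : Prop :=
  word.toList ≠ [] ∧ word.toList.length ≤ 5 ∧ word.toList.all (· ∈ vowelChars) = true
instance (word : String) : Decidable (Pre_solution word) := by unfold Pre_solution; infer_instance

def pvWitness_solution : String := "AEI"

def Spec_solution (word : String) (out : Int) : Prop := out = solution_alt word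
instance (word : String) (out : Int) : Decidable (Spec_solution word out) := by unfold Spec_solution; infer_instance

-- ===== CLAIM (what is proved, stated in full; the proofs are below) =====
def Claim_equal_solution : Prop := ∀ (word : String), Dom_solution word → Pre_solution word → Spec_solution word (solution word)

-- ===== LEMMAS AND PROOFS =====

-- char-level mirror of A's DFS
def cDFS (l : List Char) (fuel : Nat) : List (List Char) :=
  match fuel with
  | 0 => []
  | f + 1 =>
    (if l ≠ [] then [l] else []) ++
    vowelChars.flatMap (fun c => cDFS (l ++ [c]) f)

-- char-level mirror of A's scan
def cFind (data : List (List Char)) (word : List Char) (answer : Int) : Option Int :=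
  match data with
  | [] => none
  | d :: ds => if d = word then some (answer + 1) else cFind ds word (answer + 1)

-- subtree sizes: SN f = number of strings one DFS call with given fuel appends
def SN (fuel : Nat) : Nat :=
  match fuel with
  | 0 => 0
  | f + 1 => 1 + 5 * SN f

-- value A's scan reaches once the word's prefix has been found
def gval (fuel : Nat) (cs : List Char) : Int :=
  match fuel, cs with
  | _, [] => 1
  | 0, _ :: _ => 0   -- unreachable under cs.length < fuel
  | f + 1, c :: cs => 1 + vowelIdx c * (SN f : Int) + gval f cs
lemma join_two (s t : String) : (PySem.Str.join "" [s, t]).toList = s.toList ++ t.toList := by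
  rw [PySem.Str.toList_join]
  simp [PySem.Chars.join_cons_cons, PySem.Chars.join_singleton]

lemma DFS_toList (f : Nat) : ∀ s : String, (DFS s f).map String.toList = cDFS s.toList f := by
  induction f with
  | zero => intro s; rfl
  | succ f ih =>
    intro s
    simp only [DFS, cDFS, List.map_append, List.flatMap_cons, List.flatMap_nil, pyVowelStrs,
      vowelChars]
    congr 1
    · by_cases h : s.toList = []
      · have hs : s = "" := String.ext_iff.mpr (by simp [h])
        simp [hs]
      · have hs : s ≠ "" := by intro hs; apply h; simp [hs]
        have hb : (s != "") = true := by simp [bne_iff_ne]; exact hs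
        rw [if_pos hb, if_pos h]
        rfl
    · simp only [List.map_nil]
      rw [ih, ih, ih, ih, ih]
      rw [join_two s "A", join_two s "E", join_two s "I", join_two s "O", join_two s "U"]
      rfl

lemma findLoop_eq_cFind (data : List String) (word : String) (a : Int) :
    findLoop data word a = cFind (data.map String.toList) word.toList a := by
  induction data generalizing a with
  | nil => rfl
  | cons d ds ih =>
    simp only [findLoop, cFind, List.map_cons]
    have hbe : (d == word) = (d.toList = word.toList : Bool) := by
      by_cases h : d = word
      · simp [h]
      · have hne : d.toList ≠ word.toList := fun hc => h (String.ext_iff.mpr hc)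
        simp [h, hne]
    rw [hbe]
    by_cases h : d.toList = word.toList <;> simp [h, ih]

lemma cDFS_length (f : Nat) : ∀ p : List Char, p ≠ [] → (cDFS p f).length = SN f := by
  induction f with
  | zero => intro p _; rfl
  | succ f ih =>
    intro p hp
    simp only [cDFS, vowelChars, List.flatMap_cons, List.flatMap_nil, SN, if_pos hp,
      List.length_append, List.length_cons]
    rw [ih _ (by simp), ih _ (by simp), ih _ (by simp), ih _ (by simp), ih _ (by simp)]
    simp
    omega

lemma cDFS_prefix (f : Nat) : ∀ p m, m ∈ cDFS p f → p <+: m := by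
  induction f with
  | zero => intro p m h; simp [cDFS] at h
  | succ f ih =>
    intro p m h
    simp only [cDFS, vowelChars, List.flatMap_cons, List.flatMap_nil, List.mem_append] at h
    rcases h with h | h
    · split at h <;> simp at h; simp [h]
    · have hex : ∃ c, m ∈ cDFS (p ++ [c]) f := by
        rcases h with h | h | h | h | h | h
        · exact ⟨'A', h⟩
        · exact ⟨'E', h⟩
        · exact ⟨'I', h⟩
        · exact ⟨'O', h⟩
        · exact ⟨'U', h⟩
        · simp at h
      obtain ⟨c, hc⟩ := hex
      exact (List.prefix_append p [c]).trans (ih _ _ hc)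

lemma not_mem_cDFS (f : Nat) (p cs : List Char) (v c : Char) (h : v ≠ c) :
    (p ++ c :: cs) ∉ cDFS (p ++ [v]) f := by
  intro hm
  have hpre := cDFS_prefix f _ _ hm
  obtain ⟨t, ht⟩ := hpre
  rw [List.append_assoc] at ht
  have h2 := List.append_cancel_left ht
  simp at h2
  exact h h2.1

lemma cFind_append_of_not_mem (L1 L2 : List (List Char)) (w : List Char) (a : Int)
    (h : w ∉ L1) : cFind (L1 ++ L2) w a = cFind L2 w (a + L1.length) := by
  induction L1 generalizing a with
  | nil => simp
  | cons d ds ih =>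
    simp only [List.mem_cons, not_or] at h
    have hd : ¬ (d = w) := fun hdw => h.1 hdw.symm
    simp only [List.cons_append, cFind, if_neg hd]
    rw [ih _ h.2]
    congr 1
    simp only [List.length_cons]
    push_cast
    ring
lemma cFind_append_of_found (L1 L2 : List (List Char)) (w : List Char) (a r : Int)
    (h : cFind L1 w a = some r) : cFind (L1 ++ L2) w a = some r := by
  induction L1 generalizing a with
  | nil => simp [cFind] at h
  | cons d ds ih =>
    simp only [cFind, List.cons_append] at h ⊢
    by_cases hd : d = w
    · simpa [hd] using h
    · rw [if_neg hd] at h ⊢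
      exact ih _ h

lemma gval_succ (f : Nat) (c : Char) (cs : List Char) :
    gval (f + 1) (c :: cs) = 1 + vowelIdx c * (SN f : Int) + gval f cs := rfl

lemma cFind_cDFS (f : Nat) : ∀ (p cs : List Char) (a : Int), p ≠ [] → cs.length < f →
    (∀ c ∈ cs, c ∈ vowelChars) →
    cFind (cDFS p f) (p ++ cs) a = some (a + gval f cs) := by
  induction f with
  | zero => intro p cs a _ h _; omega
  | succ f ih =>
    intro p cs a hp hlen hv
    match cs with
    | [] => simp [cDFS, if_pos hp, cFind, gval]
    | c :: cs' =>
      have hne : ¬ (p = p ++ c :: cs') := by simp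
      have hlen' : cs'.length < f := by simpa using hlen
      have hv' : ∀ x ∈ cs', x ∈ vowelChars := fun x hx => hv x (List.mem_cons_of_mem _ hx)
      have hskip : ∀ v : Char, v ≠ c →
          ∀ (L : List (List Char)) (b : Int),
            cFind (cDFS (p ++ [v]) f ++ L) (p ++ c :: cs') b
              = cFind L (p ++ c :: cs') (b + (SN f : Int)) := by
        intro v hvne L b
        rw [cFind_append_of_not_mem _ _ _ _ (not_mem_cDFS f p cs' v c hvne),
          cDFS_length f _ (by simp)]
      have hhit : ∀ (L : List (List Char)) (b : Int),
          cFind (cDFS (p ++ [c]) f ++ L) (p ++ c :: cs') b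
            = some (b + gval f cs') := by
        intro L b
        apply cFind_append_of_found
        have := ih (p ++ [c]) cs' b (by simp) hlen' hv'
        simpa using this
      simp only [cDFS, if_pos hp, vowelChars, List.flatMap_cons, List.flatMap_nil,
        List.singleton_append]
      rw [show cFind ((p : List Char) ::
            (cDFS (p ++ ['A']) f ++ (cDFS (p ++ ['E']) f ++ (cDFS (p ++ ['I']) f ++
              (cDFS (p ++ ['O']) f ++ (cDFS (p ++ ['U']) f ++ [])))))) (p ++ c :: cs') a
          = cFind (cDFS (p ++ ['A']) f ++ (cDFS (p ++ ['E']) f ++ (cDFS (p ++ ['I']) f ++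
              (cDFS (p ++ ['O']) f ++ (cDFS (p ++ ['U']) f ++ []))))) (p ++ c :: cs') (a + 1)
        from by simp [cFind, hne]]
      have hc := hv c (List.mem_cons_self ..)
      simp only [vowelChars, List.mem_cons, List.not_mem_nil, or_false] at hc
      rcases hc with rfl | rfl | rfl | rfl | rfl
      · rw [hhit, gval_succ, show vowelIdx 'A' = 0 from by decide]
        congr 1; ring
      · rw [hskip 'A' (by decide), hhit, gval_succ, show vowelIdx 'E' = 1 from by decide]
        congr 1; ring
      · rw [hskip 'A' (by decide), hskip 'E' (by decide), hhit, gval_succ,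
          show vowelIdx 'I' = 2 from by decide]
        congr 1; ring
      · rw [hskip 'A' (by decide), hskip 'E' (by decide), hskip 'I' (by decide), hhit,
          gval_succ, show vowelIdx 'O' = 3 from by decide]
        congr 1; ring
      · rw [hskip 'A' (by decide), hskip 'E' (by decide), hskip 'I' (by decide),
          hskip 'O' (by decide), hhit, gval_succ, show vowelIdx 'U' = 4 from by decide]
        congr 1; ring
lemma foldl_step_gval : ∀ (cs : List Char) (f : Nat) (t : Int), cs.length ≤ f →
    (cs.foldl
      (fun (st : Int × Int) c =>
        (st.1 + vowelIdx c * st.2 + 1, PySem.Int.floordiv (st.2 - 1) 5))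
      (t, (SN f : Int))).1 = t + gval (f + 1) cs - 1 := by
  intro cs
  induction cs with
  | nil => intro f t _; simp [gval]
  | cons c cs' ih =>
    intro f t hlen
    match f with
    | 0 => simp at hlen
    | f'' + 1 =>
      have hdiv : PySem.Int.floordiv ((SN (f'' + 1) : Int) - 1) 5 = (SN f'' : Int) := by
        have h1 : ((SN (f'' + 1) : Nat) : Int) - 1 = ((5 * SN f'' : Nat) : Int) := by
          simp only [SN]; push_cast; ring
        rw [h1, show (5 : Int) = ((5 : Nat) : Int) from rfl, PySem.Int.floordiv_natCast,
          Nat.mul_div_cancel_left _ (by norm_num)]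
      simp only [List.foldl_cons, hdiv]
      rw [ih f'' _ (by simpa using hlen), gval_succ]
      ring

lemma SN_five : (SN 5 : Int) = 781 := by decide

-- ===== VERDICT =====
theorem solution_spec : Claim_equal_solution := by
  intro word _ hpre
  unfold Spec_solution
  obtain ⟨hne, hlen, hv⟩ := hpre
  simp only [List.all_eq_true, decide_eq_true_eq] at hv
  rcases hcs : word.toList with _ | ⟨c, cs⟩
  · exact absurd hcs hne
  · rw [hcs] at hlen hv
    -- A side
    have hA : solution word = (cFind (cDFS [] 6) (c :: cs) 0).getD 0 := by
      unfold solution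
      rw [findLoop_eq_cFind, DFS_toList, hcs]
      rfl
    have hskip : ∀ v : Char, v ≠ c →
        ∀ (L : List (List Char)) (b : Int),
          cFind (cDFS ([] ++ [v]) 5 ++ L) ([] ++ c :: cs) b
            = cFind L ([] ++ c :: cs) (b + (SN 5 : Int)) := by
      intro v hvne L b
      rw [cFind_append_of_not_mem _ _ _ _ (not_mem_cDFS 5 [] cs v c hvne),
        cDFS_length 5 _ (by simp)]
    have hhit : ∀ (L : List (List Char)) (b : Int),
        cFind (cDFS ([] ++ [c]) 5 ++ L) ([] ++ c :: cs) b
          = some (b + gval 5 cs) := by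
      intro L b
      apply cFind_append_of_found
      have := cFind_cDFS 5 [c] cs b (by simp) (by simp at hlen; omega)
        (fun x hx => hv x (List.mem_cons_of_mem _ hx))
      simpa using this
    simp only [List.nil_append] at hskip hhit
    -- B side
    have hB : solution_alt word
        = vowelIdx c * 781 + 1 + gval 5 cs - 1 := by
      unfold solution_alt
      rw [hcs]
      simp only [List.foldl_cons]
      have h780 : PySem.Int.floordiv ((0, (781:Int)).2 - 1) 5 = ((SN 4 : Nat) : Int) := by decide
      rw [h780]
      rw [foldl_step_gval cs 4 _ (by simp at hlen; omega)]
      norm_num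
    have hcDFS6 : cDFS [] 6
        = cDFS ['A'] 5 ++ (cDFS ['E'] 5 ++ (cDFS ['I'] 5 ++ (cDFS ['O'] 5 ++ (cDFS ['U'] 5 ++ [])))) := by
      rw [show (6 : Nat) = 5 + 1 from rfl, cDFS]
      simp only [vowelChars, List.flatMap_cons, List.flatMap_nil, List.nil_append,
        ne_eq, not_true_eq_false, if_false]
    rw [hA, hcDFS6]
    have hc := hv c (List.mem_cons_self ..)
    simp only [vowelChars, List.mem_cons, List.not_mem_nil, or_false] at hc
    rcases hc with rfl | rfl | rfl | rfl | rfl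
    · rw [hhit, hB, show vowelIdx 'A' = 0 from by decide]
      simp
    · rw [hskip 'A' (by decide), hhit, hB, show vowelIdx 'E' = 1 from by decide, SN_five]
      simp; ring
    · rw [hskip 'A' (by decide), hskip 'E' (by decide), hhit, hB,
        show vowelIdx 'I' = 2 from by decide, SN_five]
      simp; ring
    · rw [hskip 'A' (by decide), hskip 'E' (by decide), hskip 'I' (by decide), hhit, hB,
        show vowelIdx 'O' = 3 from by decide, SN_five]
      simp; ring
    · rw [hskip 'A' (by decide), hskip 'E' (by decide), hskip 'I' (by decide),
        hskip 'O' (by decide), hhit, hB, show vowelIdx 'U' = 4 from by decide, SN_five]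
      simp; ring
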